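-- pv_equiv track=rewrite | github.com/locbp-uzh/biopipelines | HelpScripts/pipe_selection_editor.py | shrink_selection
-- ===== SOURCE A (Python) =====
-- from typing import List, Tuple, Set
--
-- def shrink_selection(ranges: List[Tuple[int, int]], shrink_by: int,
--                     valid_residues: Set[int]) -> List[Tuple[int, int]]:
--     """
--     Shrink selection ranges by removing residues from each side.
--
--     Args:
--         ranges: List of (start, end) tuples
--         shrink_by: Number of residues to remove from each side
--         valid_residues: Set of valid residue numbers from PDB
--
--     Returns:
--         Shrunk ranges (empty ranges are removed)
--     """
--     if shrink_by == 0: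
--         return ranges
--
--     shrunk = []
--     for start, end in ranges:
--         # Calculate new boundaries
--         new_start = start + shrink_by
--         new_end = end - shrink_by
--
--         # Skip if range would become invalid
--         if new_start > new_end:
--             continue
--
--         # Validate against PDB residues
--         if new_start not in valid_residues or new_end not in valid_residues:
--             # Find nearest valid residues
--             valid_in_range = sorted([r for r in valid_residues if new_start <= r <= new_end])
--             if not valid_in_range:
--                 continue
--             new_start = valid_in_range[0]
--             new_end = valid_in_range[-1]
--
--         shrunk.append((new_start, new_end))
--
--     return shrunk
-- ===== SOURCE B (Python) =====
-- from typing import List, Tuple, Set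
--
--
-- def _bisect_left(a: List[int], x: int) -> int:
--     # leftmost insertion point in sorted a (= bisect.bisect_left, written out)
--     lo, hi = 0, len(a)
--     while lo < hi:
--         mid = (lo + hi) // 2
--         if a[mid] < x:
--             lo = mid + 1
--         else:
--             hi = mid
--     return lo
--
--
-- def _bisect_right(a: List[int], x: int) -> int:
--     # rightmost insertion point in sorted a (= bisect.bisect_right, written out)
--     lo, hi = 0, len(a)
--     while lo < hi:
--         mid = (lo + hi) // 2
--         if x < a[mid]:
--             hi = mid
--         else:
--             lo = mid + 1
--     return lo
--
--
-- def shrink_selection(ranges: List[Tuple[int, int]], shrink_by: int,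
--                      valid_residues: Set[int]) -> List[Tuple[int, int]]:
--     """Sort the valid residues once; each range is then snapped with two
--     binary searches instead of a per-range scan-and-sort of the whole set."""
--     if shrink_by == 0:
--         return ranges
--
--     vs = sorted(valid_residues)
--     shrunk = []
--     for start, end in ranges:
--         lo = start + shrink_by
--         hi = end - shrink_by
--         if lo > hi:
--             continue
--         i = _bisect_left(vs, lo)
--         j = _bisect_right(vs, hi)
--         if i < j:
--             shrunk.append((vs[i], vs[j - 1]))
--     return shrunk
-- ===== Notes on version B (the rewrite author's own statement) =====
-- stated objective: alternative
-- what changed: B sorts valid_residues once up front and finds each range's first/last valid residue with two binary searches, instead of A's per-range membership tests plus filter-and-sort of the whole residue set; it trades A's C-level set lookups for pure-Python binary searches, so it is not measurably faster here.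
import Mathlib
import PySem

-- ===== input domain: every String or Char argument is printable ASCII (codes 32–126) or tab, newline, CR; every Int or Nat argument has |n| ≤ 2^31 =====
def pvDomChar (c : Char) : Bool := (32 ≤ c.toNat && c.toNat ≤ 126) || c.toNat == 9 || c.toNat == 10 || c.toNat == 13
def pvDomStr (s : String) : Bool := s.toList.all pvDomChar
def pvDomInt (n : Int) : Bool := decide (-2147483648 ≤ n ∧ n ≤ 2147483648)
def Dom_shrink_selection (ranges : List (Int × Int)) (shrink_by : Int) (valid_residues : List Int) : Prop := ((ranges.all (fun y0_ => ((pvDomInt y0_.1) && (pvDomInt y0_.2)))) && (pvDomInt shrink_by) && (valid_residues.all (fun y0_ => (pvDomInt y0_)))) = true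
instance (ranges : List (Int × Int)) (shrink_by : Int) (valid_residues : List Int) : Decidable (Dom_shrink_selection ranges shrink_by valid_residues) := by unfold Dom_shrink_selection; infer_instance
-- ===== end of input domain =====

-- B replaces A's per-range membership tests and filter-and-sort of the residue set by one
-- up-front sort plus two binary searches per range; return values proved identical.

-- ===== PORT A =====
def shrink_selection (ranges : List (Int × Int)) (shrink_by : Int) (valid_residues : List Int) : List (Int × Int) :=
  if shrink_by = 0 then ranges
  else
    ranges.foldl (fun shrunk se =>
      let new_start := se.1 + shrink_by
      let new_end := se.2 - shrink_by
      if new_start > new_end then shrunk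
      else if ¬ (new_start ∈ valid_residues) ∨ ¬ (new_end ∈ valid_residues) then
        -- sorted([r for r in valid_residues if new_start <= r <= new_end])
        let valid_in_range := PySem.List.sorted (valid_residues.filter (fun r => decide (new_start ≤ r ∧ r ≤ new_end))) (fun x => x)
        if valid_in_range = [] then shrunk
        else shrunk ++ [(valid_in_range.headD 0, valid_in_range.getLastD 0)]   -- [0] and [-1] of a nonempty list
      else shrunk ++ [(new_start, new_end)]) []

-- ===== PORT B =====
-- Source B's _bisect_left/_bisect_right are bisect.bisect_left/bisect_right written out;
-- they are modelled by the PySem primitives of the same name.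
def shrink_selection_alt (ranges : List (Int × Int)) (shrink_by : Int) (valid_residues : List Int) : List (Int × Int) :=
  if shrink_by = 0 then ranges
  else
    let vs := PySem.List.sorted valid_residues (fun x => x)
    ranges.foldl (fun shrunk se =>
      let lo := se.1 + shrink_by
      let hi := se.2 - shrink_by
      if lo > hi then shrunk
      else
        let i := PySem.List.bisectLeft vs lo
        let j := PySem.List.bisectRight vs hi
        if i < j then shrunk ++ [(vs.getD i 0, vs.getD (j - 1) 0)]   -- vs[i], vs[j-1]: i < j ≤ len(vs)
        else shrunk) []

-- ===== PRECONDITION & SPEC =====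
def Spec_shrink_selection (ranges : List (Int × Int)) (shrink_by : Int) (valid_residues : List Int) (out : List (Int × Int)) : Prop := out = shrink_selection_alt ranges shrink_by valid_residues
instance (ranges : List (Int × Int)) (shrink_by : Int) (valid_residues : List Int) (out : List (Int × Int)) : Decidable (Spec_shrink_selection ranges shrink_by valid_residues out) := by unfold Spec_shrink_selection; infer_instance

-- ===== CLAIM (what is proved, stated in full; the proofs are below) =====
def Claim_equal_shrink_selection : Prop := ∀ (ranges : List (Int × Int)) (shrink_by : Int) (valid_residues : List Int), Dom_shrink_selection ranges shrink_by valid_residues → Spec_shrink_selection ranges shrink_by valid_residues (shrink_selection ranges shrink_by valid_residues)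

-- ===== LEMMAS AND PROOFS =====

-- Index bounds for any element of the sorted list satisfying the interval test.
theorem pv_mem_idx (vs : List Int) (lo hi : Int)
    (hvs : List.Pairwise (· ≤ ·) vs) (k : Nat) (hk : k < vs.length)
    (h1 : lo ≤ vs[k]) (h2 : vs[k] ≤ hi) :
    PySem.List.bisectLeft vs lo ≤ k ∧ k < PySem.List.bisectRight vs hi := by
  obtain ⟨-, hL2, -⟩ := PySem.List.bisectLeft_spec vs lo hvs
  obtain ⟨-, -, hR3⟩ := PySem.List.bisectRight_spec vs hi hvs
  constructor
  · by_contra h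
    exact absurd h1 (not_le.mpr (hL2 k hk (by omega)))
  · by_contra h
    exact absurd h2 (not_le.mpr (hR3 k hk (by omega)))

-- When the searches cross, both endpoints they designate lie in the interval.
theorem pv_idx_props (vs : List Int) (lo hi : Int)
    (hvs : List.Pairwise (· ≤ ·) vs)
    (hij : PySem.List.bisectLeft vs lo < PySem.List.bisectRight vs hi) :
    ∃ (hi' : PySem.List.bisectLeft vs lo < vs.length)
      (hj' : PySem.List.bisectRight vs hi - 1 < vs.length),
      lo ≤ vs[PySem.List.bisectLeft vs lo] ∧ vs[PySem.List.bisectLeft vs lo] ≤ hi ∧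
      lo ≤ vs[PySem.List.bisectRight vs hi - 1] ∧ vs[PySem.List.bisectRight vs hi - 1] ≤ hi := by
  obtain ⟨hL1, -, hL3⟩ := PySem.List.bisectLeft_spec vs lo hvs
  obtain ⟨hR1, hR2, -⟩ := PySem.List.bisectRight_spec vs hi hvs
  refine ⟨by omega, by omega, ?_, ?_, ?_, ?_⟩
  · exact hL3 _ (by omega) le_rfl
  · exact hR2 _ (by omega) hij
  · exact hL3 _ (by omega) (by omega)
  · exact hR2 _ (by omega) (by omega)

-- The filtered sorted list is empty iff the searches do not cross.
theorem pv_filter_empty_iff (vs : List Int) (lo hi : Int)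
    (hvs : List.Pairwise (· ≤ ·) vs) :
    (vs.filter (fun r => decide (lo ≤ r ∧ r ≤ hi)) = []
      ↔ ¬ PySem.List.bisectLeft vs lo < PySem.List.bisectRight vs hi) := by
  constructor
  · intro hF hij
    obtain ⟨hi', hj', h1, h2, -, -⟩ := pv_idx_props vs lo hi hvs hij
    have : vs[PySem.List.bisectLeft vs lo] ∈ vs.filter (fun r => decide (lo ≤ r ∧ r ≤ hi)) :=
      List.mem_filter.mpr ⟨List.getElem_mem hi', by simp [h1, h2]⟩
    rw [hF] at this
    simp at this
  · intro hij
    rw [List.filter_eq_nil_iff]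
    intro a ha hp
    simp only [decide_eq_true_eq] at hp
    obtain ⟨k, hk, hka⟩ := List.mem_iff_getElem.mp ha
    have := pv_mem_idx vs lo hi hvs k hk (hka ▸ hp.1) (hka ▸ hp.2)
    omega

-- Head of the filtered sorted list is the bisect_left element.
theorem pv_filter_head (vs : List Int) (lo hi : Int)
    (hvs : List.Pairwise (· ≤ ·) vs)
    (hij : PySem.List.bisectLeft vs lo < PySem.List.bisectRight vs hi) :
    ∀ d, (vs.filter (fun r => decide (lo ≤ r ∧ r ≤ hi))).headD d
      = vs.getD (PySem.List.bisectLeft vs lo) 0 := by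
  intro d
  obtain ⟨hL1, hL2, hL3⟩ := PySem.List.bisectLeft_spec vs lo hvs
  obtain ⟨hi', hj', h1, h2, -, -⟩ := pv_idx_props vs lo hi hvs hij
  have hsplit := List.take_append_drop (PySem.List.bisectLeft vs lo) vs
  have htake : (vs.take (PySem.List.bisectLeft vs lo)).filter (fun r => decide (lo ≤ r ∧ r ≤ hi)) = [] := by
    rw [List.filter_eq_nil_iff]
    intro a ha hp
    obtain ⟨k, hk, hka⟩ := List.mem_iff_getElem.mp ha
    simp only [List.length_take, lt_min_iff] at hk
    rw [List.getElem_take] at hka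
    have := hL2 k hk.2 hk.1
    simp only [decide_eq_true_eq] at hp
    omega
  have hdrop : vs.drop (PySem.List.bisectLeft vs lo)
      = vs[PySem.List.bisectLeft vs lo] :: vs.drop (PySem.List.bisectLeft vs lo + 1) :=
    (List.getElem_cons_drop hi').symm
  calc (vs.filter (fun r => decide (lo ≤ r ∧ r ≤ hi))).headD d
      = ((vs.take (PySem.List.bisectLeft vs lo) ++ vs.drop (PySem.List.bisectLeft vs lo)).filter
          (fun r => decide (lo ≤ r ∧ r ≤ hi))).headD d := by rw [hsplit]
    _ = vs[PySem.List.bisectLeft vs lo] := by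
          rw [List.filter_append, htake, hdrop, List.filter_cons]
          simp [h1, h2]
    _ = vs.getD (PySem.List.bisectLeft vs lo) 0 := (List.getD_eq_getElem vs 0 hi').symm

-- Last of the filtered sorted list is the bisect_right - 1 element.
theorem pv_filter_last (vs : List Int) (lo hi : Int)
    (hvs : List.Pairwise (· ≤ ·) vs)
    (hij : PySem.List.bisectLeft vs lo < PySem.List.bisectRight vs hi) :
    ∀ d, (vs.filter (fun r => decide (lo ≤ r ∧ r ≤ hi))).getLastD d
      = vs.getD (PySem.List.bisectRight vs hi - 1) 0 := by
  intro d
  obtain ⟨hR1, hR2, hR3⟩ := PySem.List.bisectRight_spec vs hi hvs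
  obtain ⟨hi', hj', -, -, h3, h4⟩ := pv_idx_props vs lo hi hvs hij
  have hsplit := List.take_append_drop (PySem.List.bisectRight vs hi) vs
  have hdrop : (vs.drop (PySem.List.bisectRight vs hi)).filter (fun r => decide (lo ≤ r ∧ r ≤ hi)) = [] := by
    rw [List.filter_eq_nil_iff]
    intro a ha hp
    obtain ⟨k, hk, hka⟩ := List.mem_iff_getElem.mp ha
    rw [List.getElem_drop] at hka
    have := hR3 (PySem.List.bisectRight vs hi + k) (by simp [List.length_drop] at hk; omega) (by omega)
    simp only [decide_eq_true_eq] at hp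
    omega
  have htake : vs.take (PySem.List.bisectRight vs hi)
      = vs.take (PySem.List.bisectRight vs hi - 1) ++ [vs[PySem.List.bisectRight vs hi - 1]] := by
    conv_lhs => rw [show PySem.List.bisectRight vs hi = (PySem.List.bisectRight vs hi - 1) + 1 from by omega]
    rw [List.take_add_one, List.getElem?_eq_getElem hj']
    rfl
  calc (vs.filter (fun r => decide (lo ≤ r ∧ r ≤ hi))).getLastD d
      = ((vs.take (PySem.List.bisectRight vs hi) ++ vs.drop (PySem.List.bisectRight vs hi)).filter
          (fun r => decide (lo ≤ r ∧ r ≤ hi))).getLastD d := by rw [hsplit]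
    _ = vs[PySem.List.bisectRight vs hi - 1] := by
          rw [List.filter_append, hdrop, List.append_nil, htake, List.filter_append, List.filter_cons]
          simp [h3, h4]
    _ = vs.getD (PySem.List.bisectRight vs hi - 1) 0 := (List.getD_eq_getElem vs 0 hj').symm

-- If lo itself is valid, bisect_left lands exactly on it (and the searches cross).
theorem pv_mem_left (vs : List Int) (lo hi : Int)
    (hvs : List.Pairwise (· ≤ ·) vs) (hle : lo ≤ hi) (hmem : lo ∈ vs) :
    PySem.List.bisectLeft vs lo < PySem.List.bisectRight vs hi ∧
    vs.getD (PySem.List.bisectLeft vs lo) 0 = lo := by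
  obtain ⟨k, hk, hka⟩ := List.mem_iff_getElem.mp hmem
  obtain ⟨hik, hkj⟩ := pv_mem_idx vs lo hi hvs k hk (by omega) (by omega)
  have hij : PySem.List.bisectLeft vs lo < PySem.List.bisectRight vs hi := by omega
  obtain ⟨hL1, hL2, hL3⟩ := PySem.List.bisectLeft_spec vs lo hvs
  refine ⟨hij, ?_⟩
  have hi' : PySem.List.bisectLeft vs lo < vs.length := by omega
  rw [List.getD_eq_getElem vs 0 hi']
  rcases eq_or_lt_of_le hik with heq | hlt
  · subst heq; exact hka
  · have hmono := List.pairwise_iff_getElem.mp hvs (PySem.List.bisectLeft vs lo) k hi' hk hlt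
    have := hL3 _ hi' le_rfl
    omega

-- If hi itself is valid, bisect_right - 1 lands exactly on it.
theorem pv_mem_right (vs : List Int) (lo hi : Int)
    (hvs : List.Pairwise (· ≤ ·) vs) (hle : lo ≤ hi) (hmem : hi ∈ vs) :
    PySem.List.bisectLeft vs lo < PySem.List.bisectRight vs hi ∧
    vs.getD (PySem.List.bisectRight vs hi - 1) 0 = hi := by
  obtain ⟨k, hk, hka⟩ := List.mem_iff_getElem.mp hmem
  obtain ⟨hik, hkj⟩ := pv_mem_idx vs lo hi hvs k hk (by omega) (by omega)
  have hij : PySem.List.bisectLeft vs lo < PySem.List.bisectRight vs hi := by omega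
  obtain ⟨hR1, hR2, hR3⟩ := PySem.List.bisectRight_spec vs hi hvs
  refine ⟨hij, ?_⟩
  have hj' : PySem.List.bisectRight vs hi - 1 < vs.length := by omega
  rw [List.getD_eq_getElem vs 0 hj']
  rcases eq_or_lt_of_le (show k ≤ PySem.List.bisectRight vs hi - 1 by omega) with heq | hlt
  · subst heq; exact hka
  · have hmono := List.pairwise_iff_getElem.mp hvs k (PySem.List.bisectRight vs hi - 1) hk hj' hlt
    have := hR2 _ hj' (by omega)
    omega

-- Sorting the filtered set equals filtering the sorted set.
theorem pv_sorted_filter (valid : List Int) (p : Int → Bool) :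
    PySem.List.sorted (valid.filter p) (fun x => x)
      = (PySem.List.sorted valid (fun x => x)).filter p := by
  apply List.Perm.eq_of_pairwise (le := (· ≤ ·))
  · intro a b _ _ h1 h2; omega
  · exact PySem.List.sorted_pairwise _ _
  · exact List.Pairwise.filter p (PySem.List.sorted_pairwise _ _)
  · exact ((PySem.List.sorted_perm _ _ _).trans
      (((PySem.List.sorted_perm valid (fun x => x) false).filter p).symm))

-- One range step of A equals one range step of B.
theorem pv_step (valid : List Int) (acc : List (Int × Int)) (lo hi : Int) (hle : lo ≤ hi) :
    (if ¬ (lo ∈ valid) ∨ ¬ (hi ∈ valid) then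
        let vir := PySem.List.sorted (valid.filter (fun r => decide (lo ≤ r ∧ r ≤ hi))) (fun x => x)
        if vir = [] then acc else acc ++ [(vir.headD 0, vir.getLastD 0)]
      else acc ++ [(lo, hi)])
    = (let vs := PySem.List.sorted valid (fun x => x)
       if PySem.List.bisectLeft vs lo < PySem.List.bisectRight vs hi then
         acc ++ [(vs.getD (PySem.List.bisectLeft vs lo) 0, vs.getD (PySem.List.bisectRight vs hi - 1) 0)]
       else acc) := by
  have hvs : List.Pairwise (· ≤ ·) (PySem.List.sorted valid (fun x => x)) :=
    PySem.List.sorted_pairwise valid (fun x => x)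
  have hm : ∀ x : Int, x ∈ valid ↔ x ∈ PySem.List.sorted valid (fun x => x) :=
    fun x => ((PySem.List.sorted_perm valid (fun x => x) false).mem_iff).symm
  simp only [pv_sorted_filter]
  set vs := PySem.List.sorted valid (fun x => x) with hvsdef
  by_cases hij : PySem.List.bisectLeft vs lo < PySem.List.bisectRight vs hi
  · simp only [if_pos hij]
    by_cases hmem : ¬ (lo ∈ valid) ∨ ¬ (hi ∈ valid)
    · rw [if_pos hmem]
      have hne : vs.filter (fun r => decide (lo ≤ r ∧ r ≤ hi)) ≠ [] := by
        intro h; exact (pv_filter_empty_iff vs lo hi hvs).mp h hij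
      rw [if_neg hne, pv_filter_head vs lo hi hvs hij, pv_filter_last vs lo hi hvs hij]
    · rw [if_neg hmem]
      rw [not_or, not_not, not_not] at hmem
      obtain ⟨hlo, hhi⟩ := hmem
      rw [(pv_mem_left vs lo hi hvs hle ((hm lo).mp hlo)).2,
          (pv_mem_right vs lo hi hvs hle ((hm hi).mp hhi)).2]
  · simp only [if_neg hij]
    have hF : vs.filter (fun r => decide (lo ≤ r ∧ r ≤ hi)) = [] :=
      (pv_filter_empty_iff vs lo hi hvs).mpr hij
    by_cases hmem : ¬ (lo ∈ valid) ∨ ¬ (hi ∈ valid)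
    · rw [if_pos hmem, if_pos hF]
    · exact absurd (pv_mem_left vs lo hi hvs hle ((hm lo).mp (not_or.mp hmem |>.1 |> not_not.mp))).1 hij

-- ===== VERDICT (by name: the statement is the Claim_ definition above) =====
theorem shrink_selection_spec : Claim_equal_shrink_selection := by
  intro ranges shrink_by valid_residues _
  unfold Spec_shrink_selection shrink_selection shrink_selection_alt
  by_cases h0 : shrink_by = 0
  · simp [h0]
  · simp only [if_neg h0]
    apply PySem.List.foldl_congr_mem
    intro acc se _
    by_cases hgt : se.1 + shrink_by > se.2 - shrink_by
    · simp [hgt]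
    · have hle : se.1 + shrink_by ≤ se.2 - shrink_by := by omega
      simpa [hgt] using pv_step valid_residues acc (se.1 + shrink_by) (se.2 - shrink_by) hle
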